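-- pv_equiv track=rewrite | github.com/LaBoa99/matematicas_discretas | s1/substraction.py | expand_number
-- ===== SOURCE A (Python) =====
-- def expand_number(n: int) -> list[int]:
--     digits = []
--     index = 0
--
--     while n > 0:
--         part = n % 10
--         part *= 10 ** index
--         n //= 10
--         index += 1
--         digits.append(part)
--
--     return digits
-- ===== SOURCE B (Python) =====
-- def expand_number(n: int) -> list[int]:
--     if n <= 0:
--         return []
--     return [n % 10] + [10 * p for p in expand_number(n // 10)]
-- ===== Notes on version B (the rewrite author's own statement) =====
-- stated objective: simpler
-- what changed: Replaces the imperative while-loop that tracks an index and multiplies each digit by 10**index with a short recursion that takes n % 10 and scales the recursive expansion of n // 10 by 10, eliminating the counter and power computation.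
import Mathlib
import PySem

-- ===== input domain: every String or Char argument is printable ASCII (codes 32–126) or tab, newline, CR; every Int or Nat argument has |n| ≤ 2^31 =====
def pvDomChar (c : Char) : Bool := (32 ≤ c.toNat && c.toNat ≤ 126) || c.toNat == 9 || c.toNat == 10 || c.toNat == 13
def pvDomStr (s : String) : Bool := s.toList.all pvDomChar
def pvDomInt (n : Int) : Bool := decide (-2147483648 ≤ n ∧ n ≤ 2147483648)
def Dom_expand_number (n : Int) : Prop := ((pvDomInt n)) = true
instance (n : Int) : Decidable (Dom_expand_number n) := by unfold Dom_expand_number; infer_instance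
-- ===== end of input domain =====

-- B replaces A's while-loop with index/power bookkeeping by a plain recursion that
-- scales the expansion of n // 10 by 10 (objective: simpler; same cost).


-- ===== PORT A =====
-- the while loop: state (n, index, digits); each step appends (n % 10) * 10 ** index
def expandLoopA (n : Int) (index : Nat) (digits : List Int) : List Int :=
  if _h : n > 0 then
    expandLoopA (PySem.Int.floordiv n 10) (index + 1)
      (digits ++ [PySem.Int.mod n 10 * 10 ^ index])
  else digits
termination_by n.toNat
decreasing_by
  have : PySem.Int.floordiv n 10 = n / 10 :=
    PySem.Int.floordiv_eq_ediv_of_pos (by norm_num)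
  rw [this]; omega

def expand_number (n : Int) : List Int := expandLoopA n 0 []

-- ===== PORT B =====
def expand_number_alt (n : Int) : List Int :=
  if _h : n ≤ 0 then []
  else
    [PySem.Int.mod n 10] ++
      (expand_number_alt (PySem.Int.floordiv n 10)).map (fun p => 10 * p)
termination_by n.toNat
decreasing_by
  have : PySem.Int.floordiv n 10 = n / 10 :=
    PySem.Int.floordiv_eq_ediv_of_pos (by norm_num)
  rw [this]; omega

-- ===== PRECONDITION & SPEC =====
def Spec_expand_number (n : Int) (out : List Int) : Prop := out = expand_number_alt n
instance (n : Int) (out : List Int) : Decidable (Spec_expand_number n out) := by unfold Spec_expand_number; infer_instance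

-- ===== CLAIM (what is proved, stated in full; the proofs are below) =====
def Claim_equal_expand_number : Prop := ∀ (n : Int), Dom_expand_number n → Spec_expand_number n (expand_number n)

-- ===== LEMMAS AND PROOFS =====
-- loop invariant: A's loop appends B's expansion scaled by 10 ^ index
theorem expandLoopA_eq (k : Nat) : ∀ (n : Int), n.toNat ≤ k → ∀ (index : Nat) (digits : List Int),
    expandLoopA n index digits
      = digits ++ (expand_number_alt n).map (fun p => 10 ^ index * p) := by
  induction k with
  | zero =>
    intro n hn index digits
    have hle : n ≤ 0 := by omega
    rw [expandLoopA, expand_number_alt]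
    simp [hle, not_lt.mpr hle]
  | succ k ih =>
    intro n hn index digits
    by_cases hpos : n > 0
    · have hdiv : PySem.Int.floordiv n 10 = n / 10 :=
        PySem.Int.floordiv_eq_ediv_of_pos (by norm_num)
      rw [expandLoopA, expand_number_alt]
      have hrec : (PySem.Int.floordiv n 10).toNat ≤ k := by rw [hdiv]; omega
      simp only [hpos, dif_pos, not_le.mpr hpos]
      rw [ih _ hrec]
      simp only [dite_false]
      rw [List.map_append, List.map_map, List.append_assoc]
      congr 2
      · simp only [List.map_cons, List.map_nil]; ring_nf
      · exact List.map_congr_left (fun p _ => by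
          simp only [Function.comp_apply, pow_succ]; ring)
    · have hle : n ≤ 0 := by omega
      rw [expandLoopA, expand_number_alt]
      simp [hle, hpos]

-- ===== VERDICT (by name: the statement is the Claim_ definition above) =====
theorem expand_number_spec : Claim_equal_expand_number := by
  intro n _
  unfold Spec_expand_number expand_number
  rw [expandLoopA_eq n.toNat n le_rfl 0 []]
  simp
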